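-- pv_equiv track=rewrite | github.com/mikegeo98/PBench | src/PBench-tool/convert_sa_plan_to_trace.py | _query_type
-- ===== SOURCE A (Python) =====
-- def _split_statements(sql: str) -> list[str]:
--     parts = [p.strip() for p in sql.split(";")]
--     return [p for p in parts if p]
--
-- def _query_type(sql: str) -> str:
--     statements = _split_statements(sql)
--     if not statements:
--         return "unknown"
--     kinds: list[str] = []
--     for stmt in statements:
--         head = stmt.lstrip().split(None, 1)[0].lower() if stmt.strip() else ""
--         kinds.append(head)
--     for kind in ("insert", "update", "delete", "merge", "truncate"):
--         if kind in kinds: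
--             return kind
--     return kinds[0] if kinds else "unknown"
-- ===== SOURCE B (Python) =====
-- _PRIORITY = ("insert", "update", "delete", "merge", "truncate")
--
-- def _query_type(sql: str) -> str:
--     first_head = None
--     best = len(_PRIORITY)
--     for raw in sql.split(";"):
--         stmt = raw.strip()
--         if not stmt:
--             continue
--         head = stmt.split(None, 1)[0].lower()
--         if first_head is None:
--             first_head = head
--         if head in _PRIORITY:
--             best = min(best, _PRIORITY.index(head))
--     if first_head is None:
--         return "unknown"
--     return _PRIORITY[best] if best < len(_PRIORITY) else first_head
-- ===== Notes on version B (the rewrite author's own statement) =====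
-- stated objective: alternative
-- what changed: Replaces A's build-the-kinds-list-then-scan-the-priority-tuple decomposition with a single accumulator-threaded pass that keeps only the first head and the minimum priority index seen, deciding the answer from those two values at the end.
import Mathlib
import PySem

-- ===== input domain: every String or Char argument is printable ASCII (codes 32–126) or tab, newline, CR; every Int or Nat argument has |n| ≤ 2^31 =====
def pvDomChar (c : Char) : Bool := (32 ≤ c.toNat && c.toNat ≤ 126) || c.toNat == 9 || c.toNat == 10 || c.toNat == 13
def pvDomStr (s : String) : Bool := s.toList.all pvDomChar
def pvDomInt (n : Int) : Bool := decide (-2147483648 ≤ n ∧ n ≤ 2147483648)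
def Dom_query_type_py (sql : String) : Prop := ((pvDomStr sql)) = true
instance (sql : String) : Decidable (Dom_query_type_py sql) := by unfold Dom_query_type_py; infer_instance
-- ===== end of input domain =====

-- B fuses A's "build kinds list, then scan the priority tuple" into one accumulator pass
-- (first head + minimum priority index); same cost, different decomposition (objective: alternative).

-- ===== PORT A =====
-- _split_statements: [p.strip() for p in sql.split(";")] filtered to the truthy ones
def splitStatements (sql : String) : List (List Char) :=
  ((PySem.Chars.splitOn sql.toList [';']).map PySem.Chars.strip).filter (fun p => p ≠ [])

def query_type_py (sql : String) : String :=
  let statements := splitStatements sql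
  if statements = [] then "unknown"
  else
    -- for stmt in statements: kinds.append(head)
    let kinds := statements.map (fun stmt =>
      if PySem.Chars.strip stmt ≠ [] then
        -- stmt.lstrip().split(None, 1)[0].lower(); index 0 is in range because stmt.strip() is nonempty
        PySem.Chars.lower (PySem.List.pyGetD (PySem.Chars.split₀Max (PySem.Chars.lstrip stmt) 1) 0 [])
      else [])
    -- for kind in ("insert","update","delete","merge","truncate"): if kind in kinds: return kind
    if "insert".toList ∈ kinds then "insert"
    else if "update".toList ∈ kinds then "update"
    else if "delete".toList ∈ kinds then "delete"
    else if "merge".toList ∈ kinds then "merge"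
    else if "truncate".toList ∈ kinds then "truncate"
    else match kinds with
      | [] => "unknown"            -- kinds[0] if kinds else "unknown"
      | k :: _ => String.ofList k

-- ===== PORT B =====
def qtPriority : List (List Char) :=
  ["insert".toList, "update".toList, "delete".toList, "merge".toList, "truncate".toList]

def query_type_py_alt (sql : String) : String :=
  let st := (PySem.Chars.splitOn sql.toList [';']).foldl
    (fun (acc : Option (List Char) × Nat) raw =>
      let stmt := PySem.Chars.strip raw
      if stmt = [] then acc
      else
        -- stmt.split(None, 1)[0].lower(); index 0 in range since stmt is nonempty
        let head := PySem.Chars.lower (PySem.List.pyGetD (PySem.Chars.split₀Max stmt 1) 0 [])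
        let fh := if acc.1 = none then some head else acc.1
        if head ∈ qtPriority then (fh, min acc.2 (qtPriority.idxOf head)) else (fh, acc.2))
    (none, 5)
  match st.1 with
  | none => "unknown"
  | some fh => if st.2 < 5 then String.ofList (qtPriority.getD st.2 []) else String.ofList fh

-- ===== PRECONDITION & SPEC =====
def Spec_query_type_py (sql : String) (out : String) : Prop := out = query_type_py_alt sql
instance (sql : String) (out : String) : Decidable (Spec_query_type_py sql out) := by unfold Spec_query_type_py; infer_instance

-- ===== CLAIM (what is proved, stated in full; the proofs are below) =====
def Claim_equal_query_type_py : Prop := ∀ (sql : String), Dom_query_type_py sql → Spec_query_type_py sql (query_type_py sql)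

-- ===== LEMMAS AND PROOFS =====

-- B's loop body, named for the proofs (definitionally the lambda inside query_type_py_alt)
def qStep (acc : Option (List Char) × Nat) (raw : List Char) : Option (List Char) × Nat :=
  let stmt := PySem.Chars.strip raw
  if stmt = [] then acc
  else
    let head := PySem.Chars.lower (PySem.List.pyGetD (PySem.Chars.split₀Max stmt 1) 0 [])
    let fh := if acc.1 = none then some head else acc.1
    if head ∈ qtPriority then (fh, min acc.2 (qtPriority.idxOf head)) else (fh, acc.2)

theorem dropWhile_dropWhile {α : Type} (p : α → Bool) (l : List α) :
    List.dropWhile p (List.dropWhile p l) = List.dropWhile p l := by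
  induction l with
  | nil => simp
  | cons a t ih =>
    by_cases h : p a
    · simp [h, ih]
    · simp [h]

theorem rstrip_prefix (s : List Char) : PySem.Chars.rstrip s <+: s := by
  simp only [PySem.Chars.rstrip]
  conv_rhs => rw [← List.reverse_reverse s]
  exact List.reverse_prefix.mpr (List.dropWhile_suffix _)

-- strip s = rstrip (lstrip s) is already left-stripped …
theorem lstrip_strip (s : List Char) :
    PySem.Chars.lstrip (PySem.Chars.strip s) = PySem.Chars.strip s := by
  simp only [PySem.Chars.strip, PySem.Chars.lstrip]
  rcases hr : PySem.Chars.rstrip (List.dropWhile PySem.Chars.isspace s) with _ | ⟨a, r⟩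
  · simp
  · obtain ⟨rest, hrest⟩ := (hr ▸ rstrip_prefix (List.dropWhile PySem.Chars.isspace s))
    have hda : ¬ PySem.Chars.isspace a = true := by
      intro hpa
      have h1 : List.dropWhile PySem.Chars.isspace s = a :: (r ++ rest) := by
        rw [← hrest]; simp
      have h2 := dropWhile_dropWhile PySem.Chars.isspace s
      rw [h1, List.dropWhile_cons, if_pos hpa] at h2
      have hle := List.length_dropWhile_le PySem.Chars.isspace (r ++ rest)
      have hlen := congrArg List.length h2
      rw [List.length_cons] at hlen
      omega
    rw [List.dropWhile_cons, if_neg hda]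

-- … and already right-stripped
theorem rstrip_strip (s : List Char) :
    PySem.Chars.rstrip (PySem.Chars.strip s) = PySem.Chars.strip s := by
  simp only [PySem.Chars.strip, PySem.Chars.rstrip, List.reverse_reverse]
  rw [dropWhile_dropWhile]

theorem strip_strip (s : List Char) :
    PySem.Chars.strip (PySem.Chars.strip s) = PySem.Chars.strip s := by
  have h1 := lstrip_strip s
  show PySem.Chars.rstrip (PySem.Chars.lstrip (PySem.Chars.strip s)) = PySem.Chars.strip s
  rw [h1, rstrip_strip]

-- the head word of an (already stripped, nonempty) statement, shared shape of both ports
def qHead (stmt : List Char) : List Char :=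
  PySem.Chars.lower (PySem.List.pyGetD (PySem.Chars.split₀Max stmt 1) 0 [])

-- priority index: position in qtPriority, 5 when absent
def pIdx (k : List Char) : Nat := qtPriority.idxOf k

theorem pIdx_le_five (k : List Char) : pIdx k ≤ 5 := by
  have := List.idxOf_le_length (l := qtPriority) (a := k)
  simpa [pIdx, qtPriority] using this

theorem pIdx_eq_of_lt (k : List Char) (h : pIdx k < 5) :
    qtPriority.getD (pIdx k) [] = k := by
  have hlt : qtPriority.idxOf k < qtPriority.length := by
    simpa [qtPriority, pIdx] using h
  rw [pIdx, List.getD_eq_getElem _ _ hlt]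
  exact List.getElem_idxOf hlt

theorem pIdx_eq_five_of_not_mem (k : List Char) (h : k ∉ qtPriority) : pIdx k = 5 := by
  have hle := pIdx_le_five k
  rcases Nat.lt_or_ge (pIdx k) 5 with hlt | hge
  · exfalso
    apply h
    rw [← pIdx_eq_of_lt k hlt]
    have hlt' : pIdx k < qtPriority.length := by simpa [qtPriority] using hlt
    rw [List.getD_eq_getElem _ _ hlt']
    exact List.getElem_mem _
  · omega

-- the heads of the statements, in order
def qKinds (parts : List (List Char)) : List (List Char) :=
  ((parts.map PySem.Chars.strip).filter (fun p => p ≠ [])).map qHead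

-- the minimum priority index over a kinds list (5 if none is a priority kind)
def bMin (K : List (List Char)) : Nat := K.foldl (fun b k => min b (pIdx k)) 5

theorem foldl_min_le (K : List (List Char)) (b0 : Nat) :
    K.foldl (fun b k => min b (pIdx k)) b0 ≤ b0 := by
  induction K generalizing b0 with
  | nil => simp
  | cons k t ih => exact le_trans (ih _) (by simp)

theorem foldl_min_le_mem (K : List (List Char)) (k : List Char) :
    ∀ b0 : Nat, k ∈ K → K.foldl (fun b k => min b (pIdx k)) b0 ≤ pIdx k := by
  induction K with
  | nil => intro b0 hk; simp at hk
  | cons a t ih =>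
    intro b0 hk
    rcases List.mem_cons.mp hk with h | h
    · subst h
      exact le_trans (foldl_min_le t _) (by simp)
    · exact ih _ h

theorem foldl_min_attained (K : List (List Char)) (b0 : Nat) :
    K.foldl (fun b k => min b (pIdx k)) b0 = b0 ∨
    ∃ k ∈ K, K.foldl (fun b k => min b (pIdx k)) b0 = pIdx k := by
  induction K generalizing b0 with
  | nil => left; rfl
  | cons a t ih =>
    rcases ih (min b0 (pIdx a)) with h | ⟨k, hk, hkeq⟩
    · simp only [List.foldl_cons]
      rcases Nat.le_total b0 (pIdx a) with hle | hle
      · left; rw [h]; omega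
      · right; exact ⟨a, List.mem_cons_self, by rw [h]; omega⟩
    · right
      exact ⟨k, List.mem_cons_of_mem _ hk, by simpa using hkeq⟩

theorem bMin_le (K : List (List Char)) (k : List Char) (hk : k ∈ K) : bMin K ≤ pIdx k :=
  foldl_min_le_mem K k 5 hk

theorem bMin_le_five (K : List (List Char)) : bMin K ≤ 5 := foldl_min_le K 5

theorem bMin_mem (K : List (List Char)) (h : bMin K < 5) :
    ∃ k ∈ K, pIdx k = bMin K := by
  rcases foldl_min_attained K 5 with heq | ⟨k, hk, hkeq⟩
  · rw [bMin] at h; omega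
  · exact ⟨k, hk, hkeq.symm⟩

theorem pIdx_getD (i : Nat) (hi : i < 5) : pIdx (qtPriority.getD i []) = i := by
  interval_cases i <;> decide

theorem mem_of_bMin_eq (K : List (List Char)) (i : Nat) (hi : i < 5) (h : bMin K = i) :
    qtPriority.getD i [] ∈ K := by
  obtain ⟨k, hk, hkeq⟩ := bMin_mem K (by omega)
  have hg : qtPriority.getD (pIdx k) [] = k := pIdx_eq_of_lt k (by omega)
  rw [hkeq, h] at hg
  rwa [hg]

theorem not_mem_of_lt_bMin (K : List (List Char)) (j : Nat) (hj : j < 5)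
    (h : j < bMin K) : qtPriority.getD j [] ∉ K := by
  intro hmem
  have := bMin_le K _ hmem
  rw [pIdx_getD j hj] at this
  omega

-- B's fold, characterized: first head kept, minimum priority index accumulated
theorem foldB_spec (parts : List (List Char)) (fh0 : Option (List Char)) (b0 : Nat)
    (hb : b0 ≤ 5) :
    parts.foldl qStep (fh0, b0)
    = ((match fh0 with | some x => some x | none => (qKinds parts).head?),
       (qKinds parts).foldl (fun b k => min b (pIdx k)) b0) := by
  induction parts generalizing fh0 b0 with
  | nil => cases fh0 <;> simp [qKinds]
  | cons raw t ih =>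
    rw [List.foldl_cons]
    by_cases hs : PySem.Chars.strip raw = []
    · have hq : qKinds (raw :: t) = qKinds t := by
        simp [qKinds, hs]
      have hstep : qStep (fh0, b0) raw = (fh0, b0) := by
        simp [qStep, hs]
      rw [hstep, ih fh0 b0 hb, hq]
    · have hq : qKinds (raw :: t) =
          PySem.Chars.lower (PySem.List.pyGetD (PySem.Chars.split₀Max (PySem.Chars.strip raw) 1) 0 [])
            :: qKinds t := by
        simp [qKinds, hs, qHead]
      rw [hq, List.foldl_cons]
      by_cases hmem : PySem.Chars.lower (PySem.List.pyGetD (PySem.Chars.split₀Max (PySem.Chars.strip raw) 1) 0 []) ∈ qtPriority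
      · have hstep : qStep (fh0, b0) raw =
            ((if fh0 = none then some (PySem.Chars.lower (PySem.List.pyGetD (PySem.Chars.split₀Max (PySem.Chars.strip raw) 1) 0 [])) else fh0),
             min b0 (qtPriority.idxOf (PySem.Chars.lower (PySem.List.pyGetD (PySem.Chars.split₀Max (PySem.Chars.strip raw) 1) 0 [])))) := by
          simp [qStep, hs, hmem]
        have hb' : min b0 (qtPriority.idxOf (PySem.Chars.lower (PySem.List.pyGetD (PySem.Chars.split₀Max (PySem.Chars.strip raw) 1) 0 []))) ≤ 5 := by
          omega
        rw [hstep, ih _ _ hb']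
        cases fh0 <;> simp [pIdx]
      · have hstep : qStep (fh0, b0) raw =
            ((if fh0 = none then some (PySem.Chars.lower (PySem.List.pyGetD (PySem.Chars.split₀Max (PySem.Chars.strip raw) 1) 0 [])) else fh0),
             b0) := by
          simp [qStep, hs, hmem]
        have hpx : min b0 (pIdx (PySem.Chars.lower (PySem.List.pyGetD (PySem.Chars.split₀Max (PySem.Chars.strip raw) 1) 0 []))) = b0 := by
          rw [pIdx_eq_five_of_not_mem _ hmem]
          omega
        rw [hstep, ih _ _ hb]
        simp only [hpx]
        cases fh0 <;> simp

-- A's per-statement head computation agrees with qHead on statements (stripped, nonempty)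
theorem kinds_eq (sql : String) :
    (splitStatements sql).map (fun stmt =>
      if PySem.Chars.strip stmt ≠ [] then
        PySem.Chars.lower (PySem.List.pyGetD (PySem.Chars.split₀Max (PySem.Chars.lstrip stmt) 1) 0 [])
      else [])
    = qKinds (PySem.Chars.splitOn sql.toList [';']) := by
  rw [qKinds]
  apply List.map_congr_left
  intro stmt hmem
  rw [splitStatements] at hmem
  have hne : stmt ≠ [] := by
    have := (List.mem_filter.mp hmem).2
    simpa using this
  obtain ⟨p, _, hp⟩ := List.mem_map.mp (List.mem_filter.mp hmem).1
  have hstrip : PySem.Chars.strip stmt = stmt := by rw [← hp, strip_strip]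
  have hlstrip : PySem.Chars.lstrip stmt = stmt := by rw [← hp, lstrip_strip]
  rw [if_pos (by rw [hstrip]; exact hne), hlstrip, qHead]

-- ===== VERDICT (by name: the statement is the Claim_ definition above) =====
theorem query_type_py_spec : Claim_equal_query_type_py := by
  intro sql _
  unfold Spec_query_type_py
  have hA : query_type_py sql =
      (if splitStatements sql = [] then "unknown"
       else
         let kinds := (splitStatements sql).map (fun stmt =>
           if PySem.Chars.strip stmt ≠ [] then
             PySem.Chars.lower (PySem.List.pyGetD (PySem.Chars.split₀Max (PySem.Chars.lstrip stmt) 1) 0 [])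
           else [])
         if "insert".toList ∈ kinds then "insert"
         else if "update".toList ∈ kinds then "update"
         else if "delete".toList ∈ kinds then "delete"
         else if "merge".toList ∈ kinds then "merge"
         else if "truncate".toList ∈ kinds then "truncate"
         else match kinds with
           | [] => "unknown"
           | k :: _ => String.ofList k) := rfl
  have hBalt : query_type_py_alt sql =
      (let st := (PySem.Chars.splitOn sql.toList [';']).foldl qStep (none, 5)
       match st.1 with
       | none => "unknown"
       | some fh => if st.2 < 5 then String.ofList (qtPriority.getD st.2 []) else String.ofList fh) := rfl
  rw [hA, hBalt, foldB_spec _ none 5 (by omega)]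
  simp only [kinds_eq]
  set K := qKinds (PySem.Chars.splitOn sql.toList [';']) with hKdef
  have hK : K = (splitStatements sql).map qHead := rfl
  by_cases hnil : splitStatements sql = []
  · rw [if_pos hnil]
    have hKnil : K = [] := by rw [hK, hnil]; rfl
    simp [hKnil]
  · rw [if_neg hnil]
    have hKne : K ≠ [] := fun h => hnil (List.map_eq_nil_iff.mp (hK ▸ h))
    rcases hKcons : K with _ | ⟨k, t⟩
    · exact absurd hKcons hKne
    have hhead : K.head? = some k := by rw [hKcons]; rfl
    have hfold : K.foldl (fun b k => min b (pIdx k)) 5 = bMin K := rfl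
    have hb5 := bMin_le_five K
    rw [← hKcons]
    simp only [hhead, hfold]
    have e0 : qtPriority.getD 0 [] = "insert".toList := by decide
    have e1 : qtPriority.getD 1 [] = "update".toList := by decide
    have e2 : qtPriority.getD 2 [] = "delete".toList := by decide
    have e3 : qtPriority.getD 3 [] = "merge".toList := by decide
    have e4 : qtPriority.getD 4 [] = "truncate".toList := by decide
    have hcase : bMin K = 0 ∨ bMin K = 1 ∨ bMin K = 2 ∨ bMin K = 3 ∨ bMin K = 4 ∨ bMin K = 5 := by
      omega
    rcases hcase with hb | hb | hb | hb | hb | hb <;> rw [hb]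
    · have hm := mem_of_bMin_eq K 0 (by omega) hb
      rw [e0] at hm
      rw [if_pos hm, if_pos (by omega : (0:Nat) < 5), e0]
      decide
    · have hm := mem_of_bMin_eq K 1 (by omega) hb
      have hn0 := not_mem_of_lt_bMin K 0 (by omega) (by omega)
      rw [e1] at hm; rw [e0] at hn0
      rw [if_neg hn0, if_pos hm, if_pos (by omega : (1:Nat) < 5), e1]
      decide
    · have hm := mem_of_bMin_eq K 2 (by omega) hb
      have hn0 := not_mem_of_lt_bMin K 0 (by omega) (by omega)
      have hn1 := not_mem_of_lt_bMin K 1 (by omega) (by omega)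
      rw [e2] at hm; rw [e0] at hn0; rw [e1] at hn1
      rw [if_neg hn0, if_neg hn1, if_pos hm, if_pos (by omega : (2:Nat) < 5), e2]
      decide
    · have hm := mem_of_bMin_eq K 3 (by omega) hb
      have hn0 := not_mem_of_lt_bMin K 0 (by omega) (by omega)
      have hn1 := not_mem_of_lt_bMin K 1 (by omega) (by omega)
      have hn2 := not_mem_of_lt_bMin K 2 (by omega) (by omega)
      rw [e3] at hm; rw [e0] at hn0; rw [e1] at hn1; rw [e2] at hn2
      rw [if_neg hn0, if_neg hn1, if_neg hn2, if_pos hm, if_pos (by omega : (3:Nat) < 5), e3]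
      decide
    · have hm := mem_of_bMin_eq K 4 (by omega) hb
      have hn0 := not_mem_of_lt_bMin K 0 (by omega) (by omega)
      have hn1 := not_mem_of_lt_bMin K 1 (by omega) (by omega)
      have hn2 := not_mem_of_lt_bMin K 2 (by omega) (by omega)
      have hn3 := not_mem_of_lt_bMin K 3 (by omega) (by omega)
      rw [e4] at hm; rw [e0] at hn0; rw [e1] at hn1; rw [e2] at hn2; rw [e3] at hn3
      rw [if_neg hn0, if_neg hn1, if_neg hn2, if_neg hn3, if_pos hm, if_pos (by omega : (4:Nat) < 5), e4]
      decide
    · have hn0 := not_mem_of_lt_bMin K 0 (by omega) (by omega)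
      have hn1 := not_mem_of_lt_bMin K 1 (by omega) (by omega)
      have hn2 := not_mem_of_lt_bMin K 2 (by omega) (by omega)
      have hn3 := not_mem_of_lt_bMin K 3 (by omega) (by omega)
      have hn4 := not_mem_of_lt_bMin K 4 (by omega) (by omega)
      rw [e0] at hn0; rw [e1] at hn1; rw [e2] at hn2; rw [e3] at hn3; rw [e4] at hn4
      rw [if_neg hn0, if_neg hn1, if_neg hn2, if_neg hn3, if_neg hn4, if_neg (by omega : ¬ (5:Nat) < 5)]
      rw [hKcons]
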